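-- pv_equiv track=rewrite | github.com/kenbockler/Andmeteaduse_masin-ppe_projekt | PROJEKT/K11/S117/2021-11-11-00-41-04/kodu2.py | transponeeriK
-- ===== SOURCE A (Python) =====
-- def transponeeriK(maatriks):
--     t_maatriks = []
--     for i in range(len(maatriks[0])):
--         jarjend = []
--         for j in range(len(maatriks)):
--             jarjend.append(maatriks[j][i])
--         t_maatriks.append(jarjend[::-1])
--     return t_maatriks[::-1]
-- ===== SOURCE B (Python) =====
-- def transponeeriK(maatriks):
--     cols = [[] for _ in maatriks[0]]
--     for row in reversed(maatriks):
--         for c, x in zip(cols, row):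
--             c.append(x)
--     return cols[::-1]
-- ===== Notes on version B (the rewrite author's own statement) =====
-- stated objective: alternative
-- what changed: A traverses column-by-column, gathering each column with an inner index loop, reversing it, and reversing the result; B traverses row-by-row in a single pass over reversed(maatriks), appending each element to its per-column accumulator (so no element-level reversal is ever performed), and finally reverses the list of accumulators.
import Mathlib
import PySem

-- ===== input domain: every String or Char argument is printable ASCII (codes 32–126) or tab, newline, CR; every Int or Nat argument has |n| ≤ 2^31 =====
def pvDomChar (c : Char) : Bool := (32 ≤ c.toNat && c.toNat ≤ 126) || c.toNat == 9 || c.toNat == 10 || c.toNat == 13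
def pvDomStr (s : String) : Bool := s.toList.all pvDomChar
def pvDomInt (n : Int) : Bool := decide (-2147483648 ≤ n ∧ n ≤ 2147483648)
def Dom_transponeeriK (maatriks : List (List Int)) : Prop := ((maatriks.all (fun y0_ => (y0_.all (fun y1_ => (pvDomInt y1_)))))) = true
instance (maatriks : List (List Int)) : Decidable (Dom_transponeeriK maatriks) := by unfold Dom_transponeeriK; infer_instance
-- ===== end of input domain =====

-- B replaces A's column-by-column gather (with two reversals) by a single row-by-row pass
-- over the reversed rows, appending each element to a per-column accumulator (alternative traversal, same cost).

-- ===== PORT A =====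
def transponeeriK (maatriks : List (List Int)) : List (List Int) :=
  match PySem.List.pyGet? maatriks 0 with
  | none => []      -- maatriks[0] raises IndexError on empty input; excluded by Pre_
  | some row0 =>
    let t_maatriks := (PySem.List.pyRange 0 (row0.length : Int) 1).foldl (fun t i =>
      let jarjend := (PySem.List.pyRange 0 (maatriks.length : Int) 1).foldl (fun acc j =>
        -- maatriks[j][i]; the inner index can raise IndexError on jagged input, excluded by Pre_
        acc ++ [PySem.List.pyGetD (PySem.List.pyGetD maatriks j []) i 0]) []
      t ++ [jarjend.reverse]) []
    t_maatriks.reverse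

-- ===== PORT B =====
def transponeeriK_alt (maatriks : List (List Int)) : List (List Int) :=
  match PySem.List.pyGet? maatriks 0 with
  | none => []      -- 'for _ in maatriks[0]' raises IndexError on empty input; excluded by Pre_
  | some row0 =>
    -- cols = [[] for _ in maatriks[0]]
    let cols0 : List (List Int) := row0.map (fun _ => [])
    -- for row in reversed(maatriks): for c, x in zip(cols, row): c.append(x)
    -- zip mutates only the first min(len cols, len row) accumulators; the rest are kept
    let cols := maatriks.reverse.foldl
      (fun cols row => List.zipWith (fun c x => c ++ [x]) cols row ++ cols.drop row.length) cols0
    cols.reverse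

-- ===== PRECONDITION & SPEC =====
-- Pre_ excludes exactly the inputs where A raises IndexError: the empty matrix, and
-- jagged matrices with some row shorter than the first row.
def Pre_transponeeriK (maatriks : List (List Int)) : Prop :=
  maatriks ≠ [] ∧ ∀ row ∈ maatriks, (maatriks.headD []).length ≤ row.length
instance (maatriks : List (List Int)) : Decidable (Pre_transponeeriK maatriks) := by
  unfold Pre_transponeeriK; infer_instance

def pvWitness_transponeeriK : List (List Int) := [[1, 2], [3, 4]]

def Spec_transponeeriK (maatriks : List (List Int)) (out : List (List Int)) : Prop := out = transponeeriK_alt maatriks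
instance (maatriks : List (List Int)) (out : List (List Int)) : Decidable (Spec_transponeeriK maatriks out) := by unfold Spec_transponeeriK; infer_instance

-- ===== CLAIM (what is proved, stated in full; the proofs are below) =====
def Claim_equal_transponeeriK : Prop := ∀ (maatriks : List (List Int)), Dom_transponeeriK maatriks → Pre_transponeeriK maatriks → Spec_transponeeriK maatriks (transponeeriK maatriks)

-- ===== LEMMAS AND PROOFS =====

-- indexing a list of rows over range(len) is mapping over the rows
theorem pvMap_range_getD (l : List (List Int)) (f : List Int → Int) :
    (List.range l.length).map (fun j => f (l.getD j [])) = l.map f := by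
  apply List.ext_getElem
  · simp
  · intro k h1 h2
    simp only [List.length_map, List.length_range] at h1
    simp only [List.getElem_map, List.getElem_range]
    rw [List.getD_eq_getElem _ _ h1]

-- A's value in closed form
theorem pvA_closed (maatriks : List (List Int)) (row0 : List Int)
    (h0 : PySem.List.pyGet? maatriks 0 = some row0) :
    transponeeriK maatriks =
      ((List.range row0.length).map (fun k =>
        (maatriks.map (fun row => row.getD k 0)).reverse)).reverse := by
  unfold transponeeriK
  rw [h0]
  simp only [PySem.List.pyRange_zero_nat, List.foldl_map,
    PySem.List.foldl_append_singleton_eq_map, List.nil_append,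
    PySem.List.pyGetD_natCast]
  congr 1
  apply List.map_congr_left
  intro k _
  congr 1
  exact pvMap_range_getD maatriks (fun row => row.getD k 0)

-- B's row-wise fold in closed form: each accumulator ends up as its start followed by its column
theorem pvFold_zip (rows : List (List Int)) :
    ∀ (init : List (List Int)), (∀ r ∈ rows, init.length ≤ r.length) →
    rows.foldl (fun cols row => List.zipWith (fun c x => c ++ [x]) cols row ++ cols.drop row.length) init
      = (List.range init.length).map
          (fun i => init.getD i [] ++ rows.map (fun r => r.getD i 0)) := by
  induction rows with
  | nil =>
    intro init _
    simp only [List.foldl_nil, List.map_nil, List.append_nil]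
    apply List.ext_getElem
    · simp
    · intro k h1 h2
      simp only [List.length_map, List.length_range] at h2
      simp only [List.getElem_map, List.getElem_range,
        List.getD_eq_getElem _ _ h1]
  | cons r rs ih =>
    intro init hlen
    have hr : init.length ≤ r.length := hlen r (by simp)
    have hdrop : init.drop r.length = [] := List.drop_eq_nil_of_le hr
    have hlen' : (List.zipWith (fun c x => c ++ [x]) init r ++ init.drop r.length).length = init.length := by
      simp [List.length_zipWith, hdrop]; omega
    rw [List.foldl_cons,
      ih _ (by intro s hs; rw [hlen']; exact hlen s (List.mem_cons_of_mem _ hs)), hlen']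
    apply List.map_congr_left
    intro i hi
    rw [List.mem_range] at hi
    rw [List.getD_eq_getElem _ _ (by simpa [hlen']),
      List.getD_eq_getElem _ _ hi]
    rw [List.getElem_append_left (by simp [List.length_zipWith]; omega),
      List.getElem_zipWith]
    simp only [List.map_cons]
    rw [List.getD_eq_getElem _ _ (by omega), List.append_assoc]
    simp

-- ===== VERDICT (by name: the statement is the Claim_ definition above) =====
theorem transponeeriK_spec : Claim_equal_transponeeriK := by
  intro maatriks _ hpre
  obtain ⟨hne, hall⟩ := hpre
  unfold Spec_transponeeriK
  obtain ⟨r0, rest, rfl⟩ : ∃ r0 rest, maatriks = r0 :: rest := by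
    cases maatriks with
    | nil => exact absurd rfl hne
    | cons a b => exact ⟨a, b, rfl⟩
  have h0 : PySem.List.pyGet? (r0 :: rest) 0 = some r0 :=
    PySem.List.pyGet?_zero_cons r0 rest
  rw [pvA_closed _ r0 h0]
  simp only [transponeeriK_alt, h0]
  have hinitlen : (r0.map (fun _ => ([] : List Int))).length = r0.length := by simp
  rw [pvFold_zip _ _ (by
    intro r hr
    rw [hinitlen]
    exact (by simpa using hall r (List.mem_reverse.mp hr)))]
  rw [hinitlen]
  congr 1
  apply List.map_congr_left
  intro i hi
  rw [List.mem_range] at hi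
  rw [List.getD_eq_getElem _ _ (by simpa), List.getElem_map]
  simp [List.map_reverse]
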